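-- pv_equiv track=rewrite | github.com/wown387/BOJ-and-Programmers | baekjoon/kakao_Bad_User.py | match_id
-- ===== SOURCE A (Python) =====
-- def match_id(u_id,banned_id):
--     for i, j in zip(u_id, banned_id):
--         if len(i) != len(j):
--             return False
--         else:
--             for k in range(len(i)):
--                 if j[k] == "*":
--                     continue
--                 elif i[k] != j[k]:
--                     return False
--     return True
-- ===== SOURCE B (Python) =====
-- def match_id(u_id, banned_id):
--     def mask(i, j):
--         # project the user id onto the pattern: wildcard positions become '*'
--         return ''.join('*' if b == '*' else a for a, b in zip(i, j))
--     return all(len(i) == len(j) and mask(i, j) == j for i, j in zip(u_id, banned_id))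
-- ===== Notes on version B (the rewrite author's own statement) =====
-- stated objective: alternative
-- what changed: Instead of A's index loop with per-character early returns, B masks each user id with the pattern's wildcard positions and tests whole-string equality masked(i,j)==j under all(); no index arithmetic or early-return control flow.
import Mathlib
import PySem

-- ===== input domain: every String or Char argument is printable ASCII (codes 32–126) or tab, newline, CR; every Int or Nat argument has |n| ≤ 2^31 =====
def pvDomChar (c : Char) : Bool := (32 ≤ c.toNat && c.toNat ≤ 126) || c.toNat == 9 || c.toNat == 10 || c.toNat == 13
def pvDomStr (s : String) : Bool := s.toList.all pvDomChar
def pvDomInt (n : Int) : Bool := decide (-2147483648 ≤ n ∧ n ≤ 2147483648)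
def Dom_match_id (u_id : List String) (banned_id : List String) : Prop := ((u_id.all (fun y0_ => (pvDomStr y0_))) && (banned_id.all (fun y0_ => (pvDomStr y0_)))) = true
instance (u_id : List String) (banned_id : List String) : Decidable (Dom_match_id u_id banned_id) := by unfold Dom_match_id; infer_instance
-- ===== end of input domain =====

-- B replaces A's indexed scan with early returns by masking the user id at the
-- pattern's wildcard positions and comparing whole strings (alternative, same cost).


-- ===== PORT A =====
-- inner loop 'for k in range(len(i))': structural recursion over the two equal-length
-- character lists in lockstep (k-th step looks at i[k], j[k])
def matchInnerA : List Char → List Char → Bool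
  | [], _ => true
  | _ :: _, [] => true   -- unreachable: caller has checked equal lengths
  | a :: as, b :: bs =>
    if b = '*' then matchInnerA as bs
    else if a ≠ b then false
    else matchInnerA as bs

-- outer loop 'for i, j in zip(u_id, banned_id)' with early 'return False'
def matchLoopA : List (String × String) → Bool
  | [] => true
  | (i, j) :: rest =>
    if i.toList.length ≠ j.toList.length then false
    else if matchInnerA i.toList j.toList then matchLoopA rest
    else false

def match_id (u_id : List String) (banned_id : List String) : Bool :=
  matchLoopA (List.zip u_id banned_id)

-- ===== PORT B =====
-- mask(i, j): wildcard positions of the pattern overwrite the user id's characters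
def maskB (li lj : List Char) : List Char :=
  List.zipWith (fun a b => if b = '*' then '*' else a) li lj

def match_id_alt (u_id : List String) (banned_id : List String) : Bool :=
  (List.zip u_id banned_id).all
    (fun p => (p.1.toList.length == p.2.toList.length) && (maskB p.1.toList p.2.toList == p.2.toList))

-- ===== PRECONDITION & SPEC =====
def Spec_match_id (u_id : List String) (banned_id : List String) (out : Bool) : Prop := out = match_id_alt u_id banned_id
instance (u_id : List String) (banned_id : List String) (out : Bool) : Decidable (Spec_match_id u_id banned_id out) := by unfold Spec_match_id; infer_instance

-- ===== CLAIM (what is proved, stated in full; the proofs are below) =====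
def Claim_equal_match_id : Prop := ∀ (u_id : List String) (banned_id : List String), Dom_match_id u_id banned_id → Spec_match_id u_id banned_id (match_id u_id banned_id)

-- ===== LEMMAS AND PROOFS =====
-- On equal-length lists, A's character scan equals B's mask-and-compare test.
theorem innerA_eq_mask (li lj : List Char) (h : li.length = lj.length) :
    matchInnerA li lj = (maskB li lj == lj) := by
  induction li generalizing lj with
  | nil =>
    cases lj with
    | nil => simp [matchInnerA, maskB]
    | cons b bs => simp at h
  | cons a as ih =>
    cases lj with
    | nil => simp at h
    | cons b bs =>
      simp only [List.length_cons, Nat.add_right_cancel_iff] at h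
      by_cases hb : b = '*'
      · simp [matchInnerA, maskB, hb, ih bs h]
      · by_cases hab : a = b
        · simp [matchInnerA, maskB, hb, hab, ih bs h]
        · simp [matchInnerA, maskB, hb, hab]

theorem loopA_eq_all (l : List (String × String)) :
    matchLoopA l = l.all (fun p => (p.1.toList.length == p.2.toList.length) && (maskB p.1.toList p.2.toList == p.2.toList)) := by
  induction l with
  | nil => rfl
  | cons p rest ih =>
    obtain ⟨i, j⟩ := p
    by_cases hlen : i.toList.length = j.toList.length
    · have hlen' : i.length = j.length := by simpa using hlen
      simp [matchLoopA, List.all_cons, hlen, hlen', innerA_eq_mask _ _ hlen, ih]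
      by_cases hm : maskB i.toList j.toList = j.toList <;> simp [hm]
    · have hlen' : ¬ i.length = j.length := by simpa using hlen
      simp [matchLoopA, List.all_cons, hlen, hlen']

-- ===== VERDICT (by name: the statement is the Claim_ definition above) =====
theorem match_id_spec : Claim_equal_match_id := by
  intro u b _
  unfold Spec_match_id match_id match_id_alt
  exact loopA_eq_all _
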